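-- pv_equiv track=rewrite | github.com/bluesimp1102/cs3310 | hw2/task3.py | max_sum_partition
-- ===== SOURCE A (Python) =====
-- def max_sum_partition(arr):
--     if len(arr) == 1:
--         return arr, []
--     elif len(arr) == 2:
--         return arr[:1], arr[1:]
--     else:
--         mid = len(arr) // 2
--         left, right = arr[:mid], arr[mid:]
--         left1, right1 = max_sum_partition(left)
--         left2, right2 = max_sum_partition(right)
--         sum1, sum2 = sum(left1) + sum(right2), sum(left2) + sum(right1)
--         return (left1 + right2, right1 + left2) if sum1 > sum2 else (left2 + right1, right2 + left1)
-- ===== SOURCE B (Python) =====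
-- def max_sum_partition(arr):
--     if not arr:
--         return [], []
--
--     def build(lo, hi):
--         # sums of the two groups for arr[lo:hi], plus the per-node decision tree
--         if hi - lo == 1:
--             return arr[lo], 0, None
--         if hi - lo == 2:
--             return arr[lo], arr[lo + 1], None
--         mid = lo + (hi - lo) // 2
--         a1, a2, lt = build(lo, mid)
--         b1, b2, rt = build(mid, hi)
--         if a1 + b2 > a2 + b1:
--             return a1 + b2, a2 + b1, (True, lt, rt)
--         return a2 + b1, a1 + b2, (False, lt, rt)
--
--     _, _, tree = build(0, len(arr))
--
--     def emit(lo, hi, t, flip, out):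
--         # appends group1 (flip=False) or group2 (flip=True) of arr[lo:hi] to out
--         if hi - lo == 1:
--             if not flip:
--                 out.append(arr[lo])
--         elif hi - lo == 2:
--             out.append(arr[lo + 1] if flip else arr[lo])
--         else:
--             mid = lo + (hi - lo) // 2
--             left_first, lt, rt = t
--             if left_first:
--                 emit(lo, mid, lt, flip, out)
--                 emit(mid, hi, rt, not flip, out)
--             else:
--                 emit(mid, hi, rt, flip, out)
--                 emit(lo, mid, lt, not flip, out)
--
--     g1, g2 = [], []
--     emit(0, len(arr), tree, False, g1)
--     emit(0, len(arr), tree, True, g2)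
--     return g1, g2
-- ===== Notes on version B (the rewrite author's own statement) =====
-- stated objective: alternative
-- what changed: Instead of re-slicing and re-summing sublists at every recursion level, B computes both group sums and a per-node swap decision in one bottom-up pass over index ranges, then materialises each output list once by an ordered traversal of that decision tree, avoiding all intermediate list concatenations and repeated sum() calls.
-- crash fix: On the empty list A raises RecursionError (it recurses forever on arr[:0] = []); B returns ([], []). — e.g. on max_sum_partition([]): A raises RecursionError, B returns ([], [])
import Mathlib
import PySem

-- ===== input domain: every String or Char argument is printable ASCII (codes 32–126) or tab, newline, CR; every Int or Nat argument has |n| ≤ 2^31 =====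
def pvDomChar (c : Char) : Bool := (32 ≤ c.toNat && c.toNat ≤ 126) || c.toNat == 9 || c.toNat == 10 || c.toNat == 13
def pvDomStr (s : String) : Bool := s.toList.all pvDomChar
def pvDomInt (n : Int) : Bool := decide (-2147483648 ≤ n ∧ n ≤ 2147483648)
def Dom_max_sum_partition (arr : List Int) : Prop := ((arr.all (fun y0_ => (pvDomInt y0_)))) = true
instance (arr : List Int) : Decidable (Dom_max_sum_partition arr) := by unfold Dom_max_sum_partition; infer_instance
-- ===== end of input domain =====

-- B replaces A's re-summing divide-and-conquer (which rebuilds and resums sublists at every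
-- level) by one bottom-up pass computing group sums and a decision tree, then two ordered
-- traversals emitting each output list once; same return value, alternative algorithm.

-- ===== PORT A =====
-- Literal transliteration of Source A. Python slices arr[:k]/arr[k:] with 0 ≤ k are exactly
-- take/drop. On [] Python recurses forever (RecursionError): the `length = 0` guard below
-- only makes the port total; Pre_ excludes that input.
def max_sum_partition (arr : List Int) : List Int × List Int :=
  if arr.length = 1 then (arr, [])
  else if arr.length = 2 then (arr.take 1, arr.drop 1)
  else if arr.length = 0 then ([], [])  -- totality guard; Python diverges here (outside Pre_)
  else
    let mid := arr.length / 2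
    let left := arr.take mid
    let right := arr.drop mid
    let lr1 := max_sum_partition left
    let lr2 := max_sum_partition right
    let sum1 := lr1.1.sum + lr2.2.sum
    let sum2 := lr2.1.sum + lr1.2.sum
    if sum1 > sum2 then (lr1.1 ++ lr2.2, lr1.2 ++ lr2.1)
    else (lr2.1 ++ lr1.2, lr2.2 ++ lr1.1)
termination_by arr.length
decreasing_by
  · simp [List.length_take]; omega
  · simp [List.length_drop]; omega

-- ===== PORT B =====
-- decision tree of Source B's `build` (None at leaves, (left_first, lt, rt) at nodes)
inductive PTree : Type where
  | leaf : PTree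
  | node : Bool → PTree → PTree → PTree
deriving DecidableEq, Repr

-- Source B's `build`: group sums and decision tree for arr[lo:hi]. Python's arr[lo] is
-- `arr.getD lo 0` (exact: every index used is in range). The `hi ≤ lo` guard only makes
-- the recursion total; Source B never reaches that case.
def pvBuild (arr : List Int) (lo hi : Nat) : Int × Int × PTree :=
  if hi - lo = 1 then (arr.getD lo 0, 0, .leaf)
  else if hi - lo = 2 then (arr.getD lo 0, arr.getD (lo + 1) 0, .leaf)
  else if hi ≤ lo then (0, 0, .leaf)  -- unreachable totality guard
  else
    let mid := lo + (hi - lo) / 2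
    let a := pvBuild arr lo mid
    let b := pvBuild arr mid hi
    if a.1 + b.2.1 > a.2.1 + b.1 then (a.1 + b.2.1, a.2.1 + b.1, .node true a.2.2 b.2.2)
    else (a.2.1 + b.1, a.1 + b.2.1, .node false a.2.2 b.2.2)
termination_by hi - lo
decreasing_by all_goals omega

-- Source B's `emit`: appends group1 (flip = false) or group2 (flip = true) of arr[lo:hi] to out;
-- structural recursion on the decision tree (the leaf case under a node range is unreachable).
def pvEmit (arr : List Int) (lo hi : Nat) (t : PTree) (flip : Bool) (out : List Int) : List Int :=
  if hi - lo = 1 then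
    if !flip then out ++ [arr.getD lo 0] else out
  else if hi - lo = 2 then
    out ++ [if flip then arr.getD (lo + 1) 0 else arr.getD lo 0]
  else
    match t with
    | .leaf => out  -- unreachable totality guard
    | .node left_first lt rt =>
        let mid := lo + (hi - lo) / 2
        if left_first then pvEmit arr mid hi rt (!flip) (pvEmit arr lo mid lt flip out)
        else pvEmit arr lo mid lt (!flip) (pvEmit arr mid hi rt flip out)

def max_sum_partition_alt (arr : List Int) : List Int × List Int :=
  if arr = [] then ([], [])
  else
    let t := (pvBuild arr 0 arr.length).2.2
    (pvEmit arr 0 arr.length t false [], pvEmit arr 0 arr.length t true [])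

-- ===== PRECONDITION & SPEC =====
-- Pre_ excludes only the empty list, on which Python A recurses forever (RecursionError).
def Pre_max_sum_partition (arr : List Int) : Prop := arr ≠ []
instance (arr : List Int) : Decidable (Pre_max_sum_partition arr) := by
  unfold Pre_max_sum_partition; infer_instance
def pvWitness_max_sum_partition : List Int := [3, -3, -6, 6, -9]

-- On the empty list A raises RecursionError; B returns ([], []).
def Raises_max_sum_partition (arr : List Int) : Prop := arr = []
instance (arr : List Int) : Decidable (Raises_max_sum_partition arr) := by
  unfold Raises_max_sum_partition; infer_instance
def pvRaiseWitness_max_sum_partition : List Int := []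
def pvRaiseWitnessOut_max_sum_partition : List Int × List Int := ([], [])

def Spec_max_sum_partition (arr : List Int) (out : List Int × List Int) : Prop :=
  out = max_sum_partition_alt arr
instance (arr : List Int) (out : List Int × List Int) : Decidable (Spec_max_sum_partition arr out) := by
  unfold Spec_max_sum_partition; infer_instance

-- ===== CLAIM =====
def Claim_equal_max_sum_partition : Prop := ∀ (arr : List Int), Dom_max_sum_partition arr →
  Pre_max_sum_partition arr → Spec_max_sum_partition arr (max_sum_partition arr)
def Claim_raises_max_sum_partition : Prop :=
  (∀ (arr : List Int), Dom_max_sum_partition arr → Raises_max_sum_partition arr →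
    ¬ Pre_max_sum_partition arr) ∧
  (Dom_max_sum_partition pvRaiseWitness_max_sum_partition ∧
    Raises_max_sum_partition pvRaiseWitness_max_sum_partition ∧
    max_sum_partition_alt pvRaiseWitness_max_sum_partition = pvRaiseWitnessOut_max_sum_partition)

-- ===== LEMMAS AND PROOFS =====

lemma pv_drop_take_cons (arr : List Int) (lo k : Nat) (h : lo < arr.length) :
    (arr.drop lo).take (k + 1) = arr.getD lo 0 :: (arr.drop (lo + 1)).take k := by
  rw [List.drop_eq_getElem_cons h, List.take_succ_cons, List.getD_eq_getElem arr 0 h]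

lemma msp_one (x : Int) : max_sum_partition [x] = ([x], []) := by
  rw [max_sum_partition.eq_def]; simp

lemma msp_two (x y : Int) : max_sum_partition [x, y] = ([x], [y]) := by
  rw [max_sum_partition.eq_def]; simp

lemma msp_big (l : List Int) (h : 3 ≤ l.length) :
    max_sum_partition l =
      if (max_sum_partition (l.take (l.length / 2))).1.sum +
           (max_sum_partition (l.drop (l.length / 2))).2.sum >
         (max_sum_partition (l.drop (l.length / 2))).1.sum +
           (max_sum_partition (l.take (l.length / 2))).2.sum
      then ((max_sum_partition (l.take (l.length / 2))).1 ++ (max_sum_partition (l.drop (l.length / 2))).2,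
            (max_sum_partition (l.take (l.length / 2))).2 ++ (max_sum_partition (l.drop (l.length / 2))).1)
      else ((max_sum_partition (l.drop (l.length / 2))).1 ++ (max_sum_partition (l.take (l.length / 2))).2,
            (max_sum_partition (l.drop (l.length / 2))).2 ++ (max_sum_partition (l.take (l.length / 2))).1) := by
  rw [max_sum_partition.eq_def]
  have h1 : ¬ l.length = 1 := by omega
  have h2 : ¬ l.length = 2 := by omega
  have h0 : ¬ l.length = 0 := by omega
  simp only [h1, h2, h0, if_false]

lemma pvBuild_big (arr : List Int) (lo hi : Nat) (h : 3 ≤ hi - lo) :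
    pvBuild arr lo hi =
      if (pvBuild arr lo (lo + (hi - lo) / 2)).1 + (pvBuild arr (lo + (hi - lo) / 2) hi).2.1 >
         (pvBuild arr lo (lo + (hi - lo) / 2)).2.1 + (pvBuild arr (lo + (hi - lo) / 2) hi).1
      then ((pvBuild arr lo (lo + (hi - lo) / 2)).1 + (pvBuild arr (lo + (hi - lo) / 2) hi).2.1,
            (pvBuild arr lo (lo + (hi - lo) / 2)).2.1 + (pvBuild arr (lo + (hi - lo) / 2) hi).1,
            .node true (pvBuild arr lo (lo + (hi - lo) / 2)).2.2 (pvBuild arr (lo + (hi - lo) / 2) hi).2.2)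
      else ((pvBuild arr lo (lo + (hi - lo) / 2)).2.1 + (pvBuild arr (lo + (hi - lo) / 2) hi).1,
            (pvBuild arr lo (lo + (hi - lo) / 2)).1 + (pvBuild arr (lo + (hi - lo) / 2) hi).2.1,
            .node false (pvBuild arr lo (lo + (hi - lo) / 2)).2.2 (pvBuild arr (lo + (hi - lo) / 2) hi).2.2) := by
  rw [pvBuild.eq_def]
  have h1 : ¬ hi - lo = 1 := by omega
  have h2 : ¬ hi - lo = 2 := by omega
  have h3 : ¬ hi ≤ lo := by omega
  simp only [h1, h2, h3, if_false]

lemma pvEmit_node (arr : List Int) (lo hi : Nat) (h : 3 ≤ hi - lo) (b : Bool) (lt rt : PTree)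
    (flip : Bool) (out : List Int) :
    pvEmit arr lo hi (.node b lt rt) flip out =
      if b then pvEmit arr (lo + (hi - lo) / 2) hi rt (!flip) (pvEmit arr lo (lo + (hi - lo) / 2) lt flip out)
      else pvEmit arr lo (lo + (hi - lo) / 2) lt (!flip) (pvEmit arr (lo + (hi - lo) / 2) hi rt flip out) := by
  rw [pvEmit.eq_def]
  have h1 : ¬ hi - lo = 1 := by omega
  have h2 : ¬ hi - lo = 2 := by omega
  simp only [h1, h2, if_false]

lemma pv_main (arr : List Int) : ∀ (n lo hi : Nat), hi - lo = n → lo < hi → hi ≤ arr.length →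
    ((pvBuild arr lo hi).1 = (max_sum_partition ((arr.drop lo).take (hi - lo))).1.sum ∧
     (pvBuild arr lo hi).2.1 = (max_sum_partition ((arr.drop lo).take (hi - lo))).2.sum) ∧
    ∀ (flip : Bool) (out : List Int),
      pvEmit arr lo hi (pvBuild arr lo hi).2.2 flip out =
        out ++ (if flip then (max_sum_partition ((arr.drop lo).take (hi - lo))).2
                else (max_sum_partition ((arr.drop lo).take (hi - lo))).1) := by
  intro n
  induction n using Nat.strong_induction_on with
  | _ n ih =>
  intro lo hi hn hlt hle
  have hlo : lo < arr.length := lt_of_lt_of_le hlt hle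
  by_cases h1 : hi - lo = 1
  · have hseg : (arr.drop lo).take (hi - lo) = [arr.getD lo 0] := by
      rw [h1, pv_drop_take_cons arr lo 0 hlo, List.take_zero]
    have hb : pvBuild arr lo hi = (arr.getD lo 0, 0, .leaf) := by
      rw [pvBuild.eq_def]; simp [h1]
    rw [hseg, msp_one, hb]
    refine ⟨⟨by simp, by simp⟩, ?_⟩
    intro flip out
    rw [pvEmit.eq_def]
    simp only [h1, if_true, if_pos rfl]
    cases flip <;> simp
  by_cases h2 : hi - lo = 2
  · have hlo1 : lo + 1 < arr.length := by omega
    have hseg : (arr.drop lo).take (hi - lo) = [arr.getD lo 0, arr.getD (lo + 1) 0] := by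
      rw [h2, pv_drop_take_cons arr lo 1 hlo, pv_drop_take_cons arr (lo + 1) 0 hlo1, List.take_zero]
    have hb : pvBuild arr lo hi = (arr.getD lo 0, arr.getD (lo + 1) 0, .leaf) := by
      rw [pvBuild.eq_def]; simp [h1, h2]
    rw [hseg, msp_two, hb]
    refine ⟨⟨by simp, by simp⟩, ?_⟩
    intro flip out
    rw [pvEmit.eq_def]
    simp only [h1, h2, if_false, if_true, if_pos rfl]
    cases flip <;> simp
  -- main case: hi - lo ≥ 3
  have h3 : 3 ≤ hi - lo := by omega
  have hmid : lo + (hi - lo) / 2 - lo = (hi - lo) / 2 := by omega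
  have hseglen : ((arr.drop lo).take (hi - lo)).length = hi - lo := by
    simp [List.length_take, List.length_drop]; omega
  have hsegL : ((arr.drop lo).take (hi - lo)).take ((hi - lo) / 2) =
      (arr.drop lo).take (lo + (hi - lo) / 2 - lo) := by
    rw [List.take_take, hmid]; congr 1; omega
  have hsegR : ((arr.drop lo).take (hi - lo)).drop ((hi - lo) / 2) =
      (arr.drop (lo + (hi - lo) / 2)).take (hi - (lo + (hi - lo) / 2)) := by
    rw [List.drop_take, List.drop_drop]; congr 1 <;> omega
  obtain ⟨⟨la1, la2⟩, lae⟩ :=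
    ih ((hi - lo) / 2) (by omega) lo (lo + (hi - lo) / 2) (by omega) (by omega) (by omega)
  obtain ⟨⟨lb1, lb2⟩, lbe⟩ :=
    ih (hi - (lo + (hi - lo) / 2)) (by omega) (lo + (hi - lo) / 2) hi (by omega) (by omega) (by omega)
  rw [← hsegL] at la1 la2 lae
  rw [← hsegR] at lb1 lb2 lbe
  rw [msp_big _ (by rw [hseglen]; exact h3), hseglen, pvBuild_big arr lo hi h3, la1, la2, lb1, lb2]
  split_ifs with hc hd hd
  · refine ⟨⟨by simp [List.sum_append, Int.add_comm], by simp [List.sum_append, Int.add_comm]⟩, ?_⟩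
    intro flip out
    simp only
    rw [pvEmit_node arr lo hi h3, if_pos rfl, lae, lbe]
    cases flip <;> simp
  · exact absurd hd (by omega)
  · exact absurd hc (by omega)
  · refine ⟨⟨by simp [List.sum_append, Int.add_comm], by simp [List.sum_append, Int.add_comm]⟩, ?_⟩
    intro flip out
    simp only
    rw [pvEmit_node arr lo hi h3, if_neg (by simp), lae, lbe]
    cases flip <;> simp

-- ===== VERDICT =====
theorem max_sum_partition_spec : Claim_equal_max_sum_partition := by
  intro arr _ hpre
  unfold Spec_max_sum_partition max_sum_partition_alt
  have hlen : 0 < arr.length := List.length_pos_iff.mpr hpre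
  have h := pv_main arr arr.length 0 arr.length rfl hlen (le_refl _)
  simp only [List.drop_zero, Nat.sub_zero, List.take_length] at h
  rw [if_neg hpre]
  dsimp only
  rw [h.2 false [], h.2 true []]
  simp

@[simp] theorem max_sum_partition_raises : Claim_raises_max_sum_partition := by
  unfold Claim_raises_max_sum_partition
  exact ⟨fun arr _ hr => by simp [Raises_max_sum_partition] at hr; simp [Pre_max_sum_partition, hr],
    by decide⟩
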